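-- pv_equiv track=rewrite | github.com/JaDogg/jadogg.github.io | docbox.py | count_and_strip
-- ===== SOURCE A (Python) =====
-- def count_and_strip(text: str, char: str) -> (int, str):
--     output = []
--     count = 0
--     counting = True
--     for x in text:
--         if counting and x == char:
--             count += 1
--             continue
--         counting = False
--         output.append(x)
--     return count, "".join(output)
-- ===== SOURCE B (Python) =====
-- def count_and_strip(text: str, char: str) -> (int, str):
--     count = 0
--     while count < len(text) and text[count] == char:
--         count += 1
--     return count, text[count:]
-- ===== Notes on version B (the rewrite author's own statement) =====
-- stated objective: simpler
-- what changed: Replaces the full-string scan with an output list and counting flag by an index-only while loop over just the matching prefix, returning a slice for the remainder.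
import Mathlib
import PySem

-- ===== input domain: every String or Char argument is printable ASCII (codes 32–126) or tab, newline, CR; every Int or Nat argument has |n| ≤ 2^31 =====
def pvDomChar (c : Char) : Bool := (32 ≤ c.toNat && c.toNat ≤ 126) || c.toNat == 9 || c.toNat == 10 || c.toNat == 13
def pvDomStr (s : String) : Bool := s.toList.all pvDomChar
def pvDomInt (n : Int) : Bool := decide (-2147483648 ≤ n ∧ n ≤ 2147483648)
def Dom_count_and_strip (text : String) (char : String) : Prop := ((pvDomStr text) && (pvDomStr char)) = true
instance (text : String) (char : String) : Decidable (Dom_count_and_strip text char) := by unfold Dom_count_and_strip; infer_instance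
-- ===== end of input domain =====

-- B replaces A's output-list accumulation and counting flag by an index-only scan of the
-- matching prefix plus a slice for the remainder (objective: simpler).

-- ===== PORT A =====
-- state = (output, count, counting); 'x == char' compares the 1-char string [x] with char
def casStepA (char : String) (st : List Char × Int × Bool) (x : Char) : List Char × Int × Bool :=
  if st.2.2 && ([x] == char.toList) then (st.1, st.2.1 + 1, st.2.2)
  else (st.1 ++ [x], st.2.1, false)

def count_and_strip (text : String) (char : String) : Int × String :=
  let st := text.toList.foldl (casStepA char) ([], 0, true)
  (st.2.1, String.ofList st.1)

-- ===== PORT B =====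
-- the while loop: advance while the current character (as a 1-char string) equals char
def casCountB (cs : List Char) (char : String) : Nat :=
  match cs with
  | [] => 0
  | c :: rest => if [c] = char.toList then casCountB rest char + 1 else 0

def count_and_strip_alt (text : String) (char : String) : Int × String :=
  let n := casCountB text.toList char
  ((n : Int), String.ofList (text.toList.drop n))

-- ===== PRECONDITION & SPEC =====
def Spec_count_and_strip (text : String) (char : String) (out : Int × String) : Prop := out = count_and_strip_alt text char
instance (text : String) (char : String) (out : Int × String) : Decidable (Spec_count_and_strip text char out) := by unfold Spec_count_and_strip; infer_instance

-- ===== CLAIM (what is proved, stated in full; the proofs are below) =====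
def Claim_equal_count_and_strip : Prop := ∀ (text : String) (char : String), Dom_count_and_strip text char → Spec_count_and_strip text char (count_and_strip text char)

-- ===== LEMMAS AND PROOFS =====
lemma foldA_false (char : String) (l out : List Char) (count : Int) :
    l.foldl (casStepA char) (out, count, false) = (out ++ l, count, false) := by
  induction l generalizing out with
  | nil => simp
  | cons c rest ih => simp [casStepA, ih]

lemma foldA_true (char : String) (l : List Char) (count : Int) :
    ((l.foldl (casStepA char) ([], count, true)).1 = l.drop (casCountB l char)) ∧
    ((l.foldl (casStepA char) ([], count, true)).2.1 = count + casCountB l char) := by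
  induction l generalizing count with
  | nil => simp [casCountB]
  | cons c rest ih =>
    by_cases h : [c] = char.toList
    · simpa [casStepA, casCountB, h, Int.add_assoc, Int.add_comm 1] using ih (count + 1)
    · simp [casStepA, casCountB, h, foldA_false]

-- ===== VERDICT (by name: the statement is the Claim_ definition above) =====
theorem count_and_strip_spec : Claim_equal_count_and_strip := by
  intro text char _
  unfold Spec_count_and_strip count_and_strip count_and_strip_alt
  have h := foldA_true char text.toList 0
  exact Prod.ext (by simpa using h.2) (by simp [h.1])
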